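-- pv_equiv track=rewrite | github.com/xid32/CS337_Proj1 | nominees/gg_api.py | strip_all_entities
-- ===== SOURCE A (Python) =====
-- import string
--
-- def strip_all_entities(text):
--     new_str = string.punctuation
--     new_str = new_str.replace('-', '')
--     new_str = new_str.replace(',', '')
--     new_str += '“'
--     entity_prefixes = ['@', '#']
--     for separator in new_str:
--         if separator not in entity_prefixes:
--             text = text.replace(separator, ' ')
--     words = []
--     for word in text.split():
--         word = word.strip()
--         if word:
--             if word[0] not in entity_prefixes:
--                 words.append(word)
--     return ' '.join(words)
-- ===== SOURCE B (Python) =====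
-- import string
--
-- _SEPS = set(string.punctuation + '“') - {'-', ',', '@', '#'}
--
-- def strip_all_entities(text):
--     cleaned = ''.join(' ' if c in _SEPS else c for c in text)
--     return ' '.join(w for w in cleaned.split() if w[0] not in '@#')
-- ===== Notes on version B (the rewrite author's own statement) =====
-- stated objective: alternative
-- what changed: B precomputes the separator set once and does a single character pass over the text (each separator becomes a space) followed by one split+filter, instead of A's ~29 repeated whole-text str.replace scans.
import Mathlib
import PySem

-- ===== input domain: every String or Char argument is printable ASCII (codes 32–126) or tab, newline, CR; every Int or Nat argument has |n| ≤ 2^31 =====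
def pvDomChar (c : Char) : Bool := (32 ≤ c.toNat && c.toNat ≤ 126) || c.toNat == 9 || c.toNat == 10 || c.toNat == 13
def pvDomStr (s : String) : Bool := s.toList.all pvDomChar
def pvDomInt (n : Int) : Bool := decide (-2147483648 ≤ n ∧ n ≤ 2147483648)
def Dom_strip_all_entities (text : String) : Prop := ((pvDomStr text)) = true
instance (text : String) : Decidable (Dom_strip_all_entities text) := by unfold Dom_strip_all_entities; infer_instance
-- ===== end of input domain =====

-- B replaces A's ~29 whole-text replace() scans by one single pass over the text
-- driven by a precomputed separator set, then one split+filter (objective: alternative).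

-- ===== PORT A =====
def strip_all_entities (text : String) : String :=
  -- new_str = string.punctuation; new_str = new_str.replace('-',''); … ; new_str += '“'
  let new_str0 := "!\"#$%&'()*+,-./:;<=>?@[\\]^_`{|}~".toList
  let new_str1 := PySem.Chars.replace new_str0 ['-'] []
  let new_str2 := PySem.Chars.replace new_str1 [','] []
  let new_str := new_str2 ++ ['“']
  let entity_prefixes : List Char := ['@', '#']
  -- for separator in new_str: if separator not in entity_prefixes: text = text.replace(separator, ' ')
  let t := new_str.foldl (fun t separator =>
      if separator ∈ entity_prefixes then t
      else PySem.Chars.replace t [separator] [' ']) text.toList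
  -- words loop: word = word.strip(); if word: if word[0] not in entity_prefixes: words.append(word)
  let words := (PySem.Chars.split₀ t).foldl (fun ws word =>
      let word := PySem.Chars.strip word
      match word with
      | [] => ws
      | c :: _ => if c ∈ entity_prefixes then ws else ws ++ [word]) []
  String.ofList (PySem.Chars.join [' '] words)

-- ===== PORT B =====
-- _SEPS = set(string.punctuation + '“') - {'-', ',', '@', '#'}
def stripB_seps : PySem.Set Char :=
  PySem.Set.diff
    (PySem.Set.ofList ("!\"#$%&'()*+,-./:;<=>?@[\\]^_`{|}~".toList ++ ['“']))
    (PySem.Set.ofList ['-', ',', '@', '#'])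

def strip_all_entities_alt (text : String) : String :=
  -- cleaned = ''.join(' ' if c in _SEPS else c for c in text)
  let cleaned := text.toList.map (fun c => if PySem.Set.contains stripB_seps c then ' ' else c)
  -- ' '.join(w for w in cleaned.split() if w[0] not in '@#')
  let words := (PySem.Chars.split₀ cleaned).filter
      (fun w => decide (w.headD ' ' ∉ (['@', '#'] : List Char)))
  String.ofList (PySem.Chars.join [' '] words)

-- ===== PRECONDITION & SPEC =====
def Spec_strip_all_entities (text : String) (out : String) : Prop := out = strip_all_entities_alt text
instance (text : String) (out : String) : Decidable (Spec_strip_all_entities text out) := by unfold Spec_strip_all_entities; infer_instance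

-- ===== CLAIM (what is proved, stated in full; the proofs are below) =====
def Claim_equal_strip_all_entities : Prop := ∀ (text : String), Dom_strip_all_entities text → Spec_strip_all_entities text (strip_all_entities text)

-- ===== LEMMAS AND PROOFS =====

-- the separator list A ends up looping over (punctuation minus '-' ',' plus '“')
def pvLA : List Char :=
  ['!', '"', '#', '$', '%', '&', '\'', '(', ')', '*', '+', '.', '/', ':', ';', '<', '=', '>', '?', '@', '[', '\\', ']', '^', '_', '`', '{', '|', '}', '~', '“']
-- B's separator set as the underlying list
def pvLB : List Char :=
  ['!', '"', '$', '%', '&', '\'', '(', ')', '*', '+', '.', '/', ':', ';', '<', '=', '>', '?', '[', '\\', ']', '^', '_', '`', '{', '|', '}', '~', '“']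

-- single-char replace is a character map
theorem pv_replace_single_go (c d : Char) :
    ∀ (fuel : Nat) (l acc : List Char), l.length ≤ fuel →
      PySem.Chars.replace.go [c] [d] fuel l acc
        = acc.reverse ++ l.map (fun x => if x = c then d else x) := by
  intro fuel
  induction fuel with
  | zero =>
    intro l acc h
    have : l = [] := List.eq_nil_of_length_eq_zero (Nat.le_zero.mp h)
    subst this; simp [PySem.Chars.replace.go]
  | succ n ih =>
    intro l acc h
    cases l with
    | nil => simp [PySem.Chars.replace.go]
    | cons x t =>
      by_cases hx : x = c
      · subst hx
        have hpre : List.isPrefixOf [x] (x :: t) = true := by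
          simp [List.isPrefixOf]
        rw [PySem.Chars.replace.go, if_pos hpre]
        simp only [List.length_cons] at h
        rw [ih _ _ (by simpa using Nat.le_of_succ_le_succ h)]
        simp
      · have hpre : List.isPrefixOf [c] (x :: t) = false := by
          simp [List.isPrefixOf]
          intro hh; exact absurd hh.symm hx
        rw [PySem.Chars.replace.go, if_neg (by simp [hpre])]
        simp only [List.length_cons] at h
        rw [ih _ _ (Nat.le_of_succ_le_succ h)]
        simp [hx]

theorem pv_replace_single (s : List Char) (c d : Char) :
    PySem.Chars.replace s [c] [d] = s.map (fun x => if x = c then d else x) := by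
  unfold PySem.Chars.replace
  rw [if_neg (by simp)]
  simpa using pv_replace_single_go c d s.length s [] le_rfl

-- A's replace-loop is one character map
theorem pv_foldl_replace (seps : List Char) : ∀ t : List Char,
    seps.foldl (fun t separator =>
        if separator ∈ (['@', '#'] : List Char) then t
        else PySem.Chars.replace t [separator] [' ']) t
      = t.map (fun x => if x ∈ seps ∧ x ∉ (['@', '#'] : List Char) then ' ' else x) := by
  induction seps with
  | nil => intro t; simp
  | cons c cs ih =>
    intro t
    by_cases hc : c ∈ (['@', '#'] : List Char)
    · rw [List.foldl_cons, if_pos hc, ih]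
      apply List.map_congr_left
      intro x _
      by_cases hx : x = c
      · subst hx; simp [hc]
      · simp [List.mem_cons, hx]
    · rw [List.foldl_cons, if_neg hc, pv_replace_single, ih, List.map_map]
      apply List.map_congr_left
      intro x _
      by_cases hx : x = c
      · subst hx
        simp [hc]
      · simp only [Function.comp_apply, if_neg hx]
        by_cases hm : x ∈ cs ∧ x ∉ (['@', '#'] : List Char)
        · rw [if_pos hm, if_pos ⟨List.mem_cons_of_mem _ hm.1, hm.2⟩]
        · rw [if_neg hm, if_neg (by
            intro hh
            exact hm ⟨(List.mem_cons.mp hh.1).resolve_left hx, hh.2⟩)]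

-- words produced by split() are nonempty and whitespace-free
theorem pv_split₀_go_mem :
    ∀ (s cur : List Char) (acc : List (List Char)),
      (∀ c ∈ cur, PySem.Chars.isspace c = false) →
      (∀ w ∈ acc, w ≠ [] ∧ ∀ c ∈ w, PySem.Chars.isspace c = false) →
      ∀ w ∈ PySem.Chars.split₀.go s cur acc,
        w ≠ [] ∧ ∀ c ∈ w, PySem.Chars.isspace c = false := by
  intro s
  induction s with
  | nil =>
    intro cur acc hcur hacc w hw
    rw [PySem.Chars.split₀.go] at hw
    by_cases hce : cur.isEmpty
    · rw [if_pos hce] at hw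
      exact hacc w (List.mem_reverse.mp hw)
    · rw [if_neg hce] at hw
      rcases List.mem_cons.mp (List.mem_reverse.mp hw) with h | h
      · subst h
        refine ⟨by simpa using (List.isEmpty_eq_false_iff.mp (by simpa using hce)), ?_⟩
        intro ch hch
        exact hcur ch (List.mem_reverse.mp hch)
      · exact hacc w h
  | cons c rest ih =>
    intro cur acc hcur hacc w hw
    rw [PySem.Chars.split₀.go] at hw
    by_cases hsp : PySem.Chars.isspace c
    · rw [if_pos hsp] at hw
      by_cases hce : cur.isEmpty
      · rw [if_pos hce] at hw
        exact ih [] acc (by simp) hacc w hw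
      · rw [if_neg hce] at hw
        refine ih [] (cur.reverse :: acc) (by simp) ?_ w hw
        intro v hv
        rcases List.mem_cons.mp hv with h | h
        · subst h
          refine ⟨by simpa using (List.isEmpty_eq_false_iff.mp (by simpa using hce)), ?_⟩
          intro ch hch
          exact hcur ch (List.mem_reverse.mp hch)
        · exact hacc v h
    · rw [if_neg hsp] at hw
      refine ih (c :: cur) acc ?_ hacc w hw
      intro ch hch
      rcases List.mem_cons.mp hch with h | h
      · subst h; simpa using hsp
      · exact hcur ch h

theorem pv_split₀_mem (t : List Char) :
    ∀ w ∈ PySem.Chars.split₀ t, w ≠ [] ∧ ∀ c ∈ w, PySem.Chars.isspace c = false := by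
  intro w hw
  exact pv_split₀_go_mem t [] [] (by simp) (by simp) w hw

theorem pv_dropWhile_all_false {p : Char → Bool} :
    ∀ l : List Char, (∀ a ∈ l, p a = false) → l.dropWhile p = l := by
  intro l h
  cases l with
  | nil => rfl
  | cons a t => rw [List.dropWhile_cons_of_neg (by simp [h a List.mem_cons_self])]

theorem pv_strip_eq_self (w : List Char)
    (h : ∀ c ∈ w, PySem.Chars.isspace c = false) : PySem.Chars.strip w = w := by
  unfold PySem.Chars.strip PySem.Chars.lstrip PySem.Chars.rstrip
  rw [pv_dropWhile_all_false w h,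
      pv_dropWhile_all_false w.reverse (fun a ha => h a (List.mem_reverse.mp ha)),
      List.reverse_reverse]

-- A's map function equals B's map function, pointwise
theorem pv_sep_cond (c : Char) :
    (if c ∈ pvLA ∧ c ∉ (['@', '#'] : List Char) then ' ' else c)
      = (if PySem.Set.contains stripB_seps c then ' ' else c) := by
  have hBset : stripB_seps = pvLB := by decide
  by_cases h : c ∈ pvLA
  · fin_cases h <;> decide
  · rw [if_neg (fun hh => h hh.1), if_neg ?_]
    intro hc
    have hmem : c ∈ pvLB := (PySem.Set.contains_iff _ _).mp (by rw [← hBset]; exact hc)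
    have hsub : c ∈ pvLB → c ∈ pvLA := by
      intro hm; fin_cases hm <;> decide
    exact h (hsub hmem)

-- ===== VERDICT (by name: the statement is the Claim_ definition above) =====
theorem strip_all_entities_spec : Claim_equal_strip_all_entities := by
  intro text _
  show strip_all_entities text = strip_all_entities_alt text
  simp only [strip_all_entities, strip_all_entities_alt]
  have hnew :
      PySem.Chars.replace
          (PySem.Chars.replace "!\"#$%&'()*+,-./:;<=>?@[\\]^_`{|}~".toList ['-'] []) [','] []
        ++ ['“'] = pvLA := by decide
  rw [hnew, pv_foldl_replace]
  have hmapeq :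
      text.toList.map (fun x => if x ∈ pvLA ∧ x ∉ (['@', '#'] : List Char) then ' ' else x)
        = text.toList.map (fun c => if PySem.Set.contains stripB_seps c then ' ' else c) :=
    List.map_congr_left (fun x _ => pv_sep_cond x)
  rw [hmapeq]
  set cleaned := text.toList.map (fun c => if PySem.Set.contains stripB_seps c then ' ' else c) with hcl
  congr 1
  rw [PySem.List.foldl_congr_mem (PySem.Chars.split₀ cleaned) _
        (fun ws w => if w.headD ' ' ∉ (['@', '#'] : List Char) then ws ++ [w] else ws) []
        ?_]
  · rw [PySem.List.foldl_append_ite_eq_filter]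
    simp
  · intro acc w hw
    obtain ⟨hne, hns⟩ := pv_split₀_mem cleaned w hw
    rw [pv_strip_eq_self w hns]
    cases w with
    | nil => exact absurd rfl hne
    | cons ch tl =>
      by_cases hch : ch ∈ (['@', '#'] : List Char)
      · simp [hch]
      · simp [hch]
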